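-- pv_equiv track=rewrite | github.com/demjanp/deposit | bin/tst_prune.py | prune_paths
-- ===== SOURCE A (Python) =====
-- from collections import defaultdict
--
-- def prune_paths(paths):
--
-- 	paths_ = defaultdict(list)
-- 	for path in paths:
-- 		paths_[len(path)].append(set(path))
-- 	lens = sorted(paths_.keys())[::-1]
-- 	if len(lens) < 2:
-- 		return paths
-- 	if min(lens) < 2:
-- 		return paths
-- 	for i in range(len(lens) - 1):
-- 		for path_i in paths_[lens[i]]:
-- 			for j in range(i + 1, len(lens)):
-- 				paths_[lens[j]] = [path_j for path_j in paths_[lens[j]] if not path_j < path_i]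
--
-- 	return set.union(*[set([tuple(sorted(path)) for path in paths_[key]]) for key in paths_])
-- ===== SOURCE B (Python) =====
-- def prune_paths(paths):
-- 	# Direct characterization: a path's set is dropped iff it is a proper subset
-- 	# of the set of ANY longer path (no survivor bookkeeping, no staged pruning:
-- 	# a pruned pruner always has a surviving superset, so the conditions agree).
-- 	items = [(len(p), set(p)) for p in paths]
-- 	lens = dict.fromkeys(L for L, _ in items)
-- 	if len(lens) < 2 or min(lens) < 2:
-- 		return paths
-- 	def keep(L, s):
-- 		return not any(M > L and s < t for M, t in items)
-- 	return {tuple(sorted(s)) for L in lens for M, s in items if M == L and keep(M, s)}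
-- ===== Notes on version B (the rewrite author's own statement) =====
-- stated objective: alternative
-- what changed: A iteratively rewrites shorter buckets in place, pruning a set only against longer sets that themselves SURVIVED the staged pruning; B drops the whole survivor mechanism and tests each path's set directly against the set of every longer path, relying on the proved fact that a pruned pruner always has a surviving superset, so the two criteria coincide.
import Mathlib
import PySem

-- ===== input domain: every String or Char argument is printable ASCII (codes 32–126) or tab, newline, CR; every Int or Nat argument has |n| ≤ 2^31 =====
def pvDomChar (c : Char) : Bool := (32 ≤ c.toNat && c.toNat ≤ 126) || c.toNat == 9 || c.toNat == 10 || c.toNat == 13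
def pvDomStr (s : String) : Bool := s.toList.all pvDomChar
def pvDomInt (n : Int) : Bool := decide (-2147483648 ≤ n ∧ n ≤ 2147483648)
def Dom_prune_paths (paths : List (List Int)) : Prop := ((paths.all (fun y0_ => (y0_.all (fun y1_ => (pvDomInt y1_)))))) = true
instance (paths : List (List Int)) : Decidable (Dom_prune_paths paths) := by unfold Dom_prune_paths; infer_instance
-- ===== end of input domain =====

-- B replaces A's staged survivor pruning (triple loop rewriting shorter buckets in place)
-- by a direct per-path test: drop a set iff it is a proper subset of the set of ANY longer
-- path (the theorem below shows the two criteria agree).  Objective: alternative.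

-- ===== PORT A =====
-- Python's 'path_j < path_i' on sets (proper subset); used by both ports.
def setLt (s t : PySem.Set Int) : Bool := PySem.Set.issubset s t && !(PySem.Set.equal s t)

def prune_paths (paths : List (List Int)) : List (List Int) :=
  let paths_ : PySem.Dict Int (List (PySem.Set Int)) :=
    paths.foldl (fun d path => d.modify ((path.length : Int)) [] (fun l => l ++ [PySem.Set.ofList path])) PySem.Dict.empty
  -- sorted(paths_.keys())[::-1]  ('[::-1]' is reversal)
  let lens : List Int := (PySem.List.sorted paths_.keys (fun x => x) false).reverse
  if lens.length < 2 then paths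
  else
    match PySem.List.min? lens (fun x => x) with
    | none => paths   -- unreachable: lens ≠ [] in this branch (Python's min raises only on [])
    | some m =>
      if m < 2 then paths
      else
        let d := (PySem.List.pyRange 0 ((lens.length : Int) - 1)).foldl (fun d i =>
          (d.getD (PySem.List.pyGetD lens i 0) []).foldl (fun d path_i =>
            (PySem.List.pyRange (i + 1) (lens.length : Int)).foldl (fun d j =>
              d.insert (PySem.List.pyGetD lens j 0)
                ((d.getD (PySem.List.pyGetD lens j 0) []).filter (fun path_j => !(setLt path_j path_i)))) d) d) paths_
        d.keys.foldl (fun acc key =>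
          PySem.Set.union acc (PySem.Set.ofList ((d.getD key []).map (fun path => PySem.List.sorted path (fun x => x) false)))) PySem.Set.empty

-- ===== PORT B =====
-- Source B's 'keep(M, s)': not any(M2 > M and s < t for M2, t in items)
def keepB (items : List (Int × PySem.Set Int)) (M : Int) (s : PySem.Set Int) : Bool :=
  !(items.any (fun mt => decide (M < mt.1) && setLt s mt.2))

def prune_paths_alt (paths : List (List Int)) : List (List Int) :=
  let items : List (Int × PySem.Set Int) := paths.map (fun p => ((p.length : Int), PySem.Set.ofList p))
  let lens : List Int := PySem.List.dedup (items.map (fun ms => ms.1))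
  if lens.length < 2 then paths
  else
    match PySem.List.min? lens (fun x => x) with
    | none => paths   -- unreachable: lens ≠ [] in this branch
    | some m =>
      if m < 2 then paths
      else
        -- {tuple(sorted(s)) for L in lens for M, s in items if M == L and keep(M, s)}
        lens.foldl (fun acc L =>
          items.foldl (fun acc ms =>
            if ms.1 == L && keepB items ms.1 ms.2
            then PySem.Set.add acc (PySem.List.sorted ms.2 (fun x => x) false)
            else acc) acc) PySem.Set.empty

-- ===== PRECONDITION & SPEC =====
def Spec_prune_paths (paths : List (List Int)) (out : List (List Int)) : Prop := out = prune_paths_alt paths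
instance (paths : List (List Int)) (out : List (List Int)) : Decidable (Spec_prune_paths paths out) := by unfold Spec_prune_paths; infer_instance

-- ===== CLAIM (what is proved, stated in full; the proofs are below) =====
def Claim_equal_prune_paths : Prop := ∀ (paths : List (List Int)), Dom_prune_paths paths → Spec_prune_paths paths (prune_paths paths)

-- ===== LEMMAS AND PROOFS =====

theorem update_self_of_mem {s : PySem.Set Int} {xs : List Int} (h : ∀ x ∈ xs, x ∈ s) :
    PySem.Set.update s xs = s := by
  induction xs generalizing s with
  | nil => rfl
  | cons x xs ih =>
    have : PySem.Set.add s x = s := by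
      simp only [PySem.Set.add]
      rw [if_pos ((PySem.Set.contains_iff s x).2 (h x (by simp)))]
    show PySem.Set.update (PySem.Set.add s x) xs = s
    rw [this]
    exact ih (fun y hy => h y (by simp [hy]))

theorem innerLoop (Ls : List Int) (s : PySem.Set Int) (J : List Int)
    (d : PySem.Dict Int (List (PySem.Set Int))) :
    (∀ k, (∀ j ∈ J, k ≠ PySem.List.pyGetD Ls j 0) →
      (J.foldl (fun d j => d.insert (PySem.List.pyGetD Ls j 0)
          ((d.getD (PySem.List.pyGetD Ls j 0) []).filter (fun t => !(setLt t s)))) d).getD k []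
        = d.getD k [])
    ∧ (∀ k, (∃ j ∈ J, k = PySem.List.pyGetD Ls j 0) →
      (J.foldl (fun d j => d.insert (PySem.List.pyGetD Ls j 0)
          ((d.getD (PySem.List.pyGetD Ls j 0) []).filter (fun t => !(setLt t s)))) d).getD k []
        = (d.getD k []).filter (fun t => !(setLt t s))) := by
  induction J generalizing d with
  | nil =>
    constructor
    · intro k _; rfl
    · rintro k ⟨j, hj, _⟩; cases hj
  | cons j0 rest ih =>
    set k0 := PySem.List.pyGetD Ls j0 0 with hk0def
    set d1 := d.insert k0 ((d.getD k0 []).filter (fun t => !(setLt t s))) with hd1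
    have hd1get : ∀ k, d1.getD k [] = if k = k0 then (d.getD k0 []).filter (fun t => !(setLt t s)) else d.getD k [] := by
      intro k; rw [hd1, PySem.Dict.getD_insert]
    constructor
    · intro k hk
      rw [List.foldl_cons, (ih d1).1 k (fun j hj => hk j (by simp [hj]))]
      rw [hd1get, if_neg (hk j0 (by simp))]
    · intro k hk
      rw [List.foldl_cons]
      by_cases hrest : ∃ j ∈ rest, k = PySem.List.pyGetD Ls j 0
      · rw [(ih d1).2 k hrest, hd1get]
        by_cases hkk : k = k0
        · rw [if_pos hkk, hkk, List.filter_filter]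
          simp [Bool.and_self]
        · rw [if_neg hkk]
      · have hkk : k = k0 := by
          rcases hk with ⟨j, hj, hkey⟩
          rcases List.mem_cons.1 hj with h | h
          · rw [hkey, h]
          · exact absurd ⟨j, h, hkey⟩ hrest
        rw [(ih d1).1 k (fun j hj hc => hrest ⟨j, hj, hc⟩), hd1get, if_pos hkk, hkk]

theorem midLoop (Ls : List Int) (J : List Int) (S : List (PySem.Set Int))
    (d : PySem.Dict Int (List (PySem.Set Int))) :
    (∀ k, (∀ j ∈ J, k ≠ PySem.List.pyGetD Ls j 0) →
      (S.foldl (fun d path_i => J.foldl (fun d j => d.insert (PySem.List.pyGetD Ls j 0)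
          ((d.getD (PySem.List.pyGetD Ls j 0) []).filter (fun t => !(setLt t path_i)))) d) d).getD k []
        = d.getD k [])
    ∧ (∀ k, (∃ j ∈ J, k = PySem.List.pyGetD Ls j 0) →
      (S.foldl (fun d path_i => J.foldl (fun d j => d.insert (PySem.List.pyGetD Ls j 0)
          ((d.getD (PySem.List.pyGetD Ls j 0) []).filter (fun t => !(setLt t path_i)))) d) d).getD k []
        = (d.getD k []).filter (fun t => !(S.any (fun s => setLt t s)))) := by
  induction S generalizing d with
  | nil =>
    constructor
    · intro k _; rfl
    · intro k _; simp
  | cons s S' ih =>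
    constructor
    · intro k hk
      rw [List.foldl_cons, (ih _).1 k hk, (innerLoop Ls s J d).1 k hk]
    · intro k hk
      rw [List.foldl_cons, (ih _).2 k hk, (innerLoop Ls s J d).2 k hk, List.filter_filter]
      congr 1; funext t; simp [Bool.and_comm]

theorem keysPreserved (Ls : List Int) (J : List Int) (S : List (PySem.Set Int))
    (d : PySem.Dict Int (List (PySem.Set Int))) (hJ : ∀ j ∈ J, PySem.List.pyGetD Ls j 0 ∈ d.keys) :
    (S.foldl (fun d path_i => J.foldl (fun d j => d.insert (PySem.List.pyGetD Ls j 0)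
        ((d.getD (PySem.List.pyGetD Ls j 0) []).filter (fun t => !(setLt t path_i)))) d) d).keys = d.keys := by
  induction S generalizing d with
  | nil => rfl
  | cons s S' ih =>
    rw [List.foldl_cons]
    have h1 : (J.foldl (fun d j => d.insert (PySem.List.pyGetD Ls j 0)
        ((d.getD (PySem.List.pyGetD Ls j 0) []).filter (fun t => !(setLt t s)))) d).keys = d.keys := by
      rw [PySem.Dict.keys_foldl_insert_key J (fun j => PySem.List.pyGetD Ls j 0)
        (fun d j => ((d.getD (PySem.List.pyGetD Ls j 0) []).filter (fun t => !(setLt t s)))) d]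
      exact update_self_of_mem (by
        intro x hx
        rcases List.mem_map.1 hx with ⟨j, hj, rfl⟩
        exact hJ j hj)
    rw [ih _ (fun j hj => h1 ▸ hJ j hj), h1]

def kept1 (orig : Int → List (PySem.Set Int)) (surv : List (PySem.Set Int)) (L : Int) : List (PySem.Set Int) :=
  (orig L).filter (fun s => !(surv.any (fun t => setLt s t)))

def survAcc (orig : Int → List (PySem.Set Int)) (Ls : List Int) (surv0 : List (PySem.Set Int)) : Nat → List (PySem.Set Int)
  | 0 => surv0
  | i+1 => survAcc orig Ls surv0 i ++ kept1 orig (survAcc orig Ls surv0 i) (Ls.getD i 0)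

theorem aLoop (orig : Int → List (PySem.Set Int)) (Ls : List Int) (hnd : Ls.Nodup)
    (G : PySem.Dict Int (List (PySem.Set Int))) (hkeys : ∀ L ∈ Ls, L ∈ G.keys)
    (hG : ∀ L, G.getD L [] = orig L) (m : Nat) (hm : m ≤ Ls.length - 1) :
    ((List.range m).foldl (fun d i =>
        ((d.getD (PySem.List.pyGetD Ls (i : Int) 0) []).foldl (fun d path_i =>
          (PySem.List.pyRange ((i : Int) + 1) (Ls.length : Int)).foldl (fun d j =>
            d.insert (PySem.List.pyGetD Ls j 0)
              ((d.getD (PySem.List.pyGetD Ls j 0) []).filter (fun path_j => !(setLt path_j path_i)))) d) d)) G).keys = G.keys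
    ∧ ∀ j, j < Ls.length →
      ((List.range m).foldl (fun d i =>
        ((d.getD (PySem.List.pyGetD Ls (i : Int) 0) []).foldl (fun d path_i =>
          (PySem.List.pyRange ((i : Int) + 1) (Ls.length : Int)).foldl (fun d j =>
            d.insert (PySem.List.pyGetD Ls j 0)
              ((d.getD (PySem.List.pyGetD Ls j 0) []).filter (fun path_j => !(setLt path_j path_i)))) d) d)) G).getD (Ls.getD j 0) []
        = kept1 orig (survAcc orig Ls [] (min j m)) (Ls.getD j 0) := by
  induction m with
  | zero =>
    refine ⟨rfl, fun j hj => ?_⟩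
    simp only [List.range_zero, List.foldl_nil, Nat.min_zero]
    rw [hG]
    simp [kept1, survAcc]
  | succ m ihm =>
    have hlen : m + 2 ≤ Ls.length := by omega
    obtain ⟨IH1, IH2⟩ := ihm (by omega)
    rw [List.range_succ, List.foldl_append, List.foldl_cons, List.foldl_nil]
    set dm := ((List.range m).foldl (fun d i =>
        ((d.getD (PySem.List.pyGetD Ls (i : Int) 0) []).foldl (fun d path_i =>
          (PySem.List.pyRange ((i : Int) + 1) (Ls.length : Int)).foldl (fun d j =>
            d.insert (PySem.List.pyGetD Ls j 0)
              ((d.getD (PySem.List.pyGetD Ls j 0) []).filter (fun path_j => !(setLt path_j path_i)))) d) d)) G) with hdm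
    have hkeyS : PySem.List.pyGetD Ls (m : Int) 0 = Ls.getD m 0 := PySem.List.pyGetD_natCast Ls m 0
    have hS : dm.getD (PySem.List.pyGetD Ls (m : Int) 0) []
        = kept1 orig (survAcc orig Ls [] m) (Ls.getD m 0) := by
      rw [hkeyS]
      have := IH2 m (by omega)
      simpa [Nat.min_self] using this
    have hJ : ∀ j ∈ PySem.List.pyRange ((m : Int) + 1) (Ls.length : Int),
        ((m : Int) + 1 ≤ j ∧ j < (Ls.length : Int)) := by
      intro j hj; exact PySem.List.mem_pyRange_one.1 hj
    have hJmemkeys : ∀ j ∈ PySem.List.pyRange ((m : Int) + 1) (Ls.length : Int),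
        PySem.List.pyGetD Ls j 0 ∈ dm.keys := by
      intro j hj
      obtain ⟨h1, h2⟩ := hJ j hj
      have h0 : (0:Int) ≤ j := by omega
      rw [PySem.List.pyGetD_eq_getElem Ls 0 h0 h2, IH1]
      exact hkeys _ (List.getElem_mem _)
    refine ⟨?_, ?_⟩
    · rw [keysPreserved Ls _ _ dm hJmemkeys, IH1]
    · intro j hj
      by_cases hjm : j ≤ m
      · -- untouched: key index j not in (m+1 ..)
        have hne : ∀ j' ∈ PySem.List.pyRange ((m : Int) + 1) (Ls.length : Int),
            Ls.getD j 0 ≠ PySem.List.pyGetD Ls j' 0 := by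
          intro j' hj' he
          obtain ⟨h1, h2⟩ := hJ j' hj'
          have h0 : (0:Int) ≤ j' := by omega
          rw [PySem.List.pyGetD_eq_getElem Ls 0 h0 h2, List.getD_eq_getElem Ls 0 hj] at he
          have : j = j'.toNat := (List.Nodup.getElem_inj_iff hnd).1 he
          omega
        rw [(midLoop Ls _ _ dm).1 _ hne, IH2 j hj]
        have : min j (m+1) = min j m := by omega
        rw [this]
      · -- pruned region: m+1 ≤ j
        have hmem : ∃ j' ∈ PySem.List.pyRange ((m : Int) + 1) (Ls.length : Int),
            Ls.getD j 0 = PySem.List.pyGetD Ls j' 0 := by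
          refine ⟨(j : Int), PySem.List.mem_pyRange_one.2 (by omega), ?_⟩
          rw [PySem.List.pyGetD_natCast]
        rw [(midLoop Ls _ _ dm).2 _ hmem, IH2 j hj]
        have hminm : min j m = m := by omega
        have hminm1 : min j (m+1) = m + 1 := by omega
        rw [hminm, hminm1, hS]
        show _ = kept1 orig (survAcc orig Ls [] m ++ kept1 orig (survAcc orig Ls [] m) (Ls.getD m 0)) (Ls.getD j 0)
        simp only [kept1, List.filter_filter, List.any_append]
        congr 1; funext t
        simp only [Bool.not_or, Bool.and_comm]

theorem min?_id_perm (xs ys : List Int) (h : xs.Perm ys) :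
    PySem.List.min? xs (fun x => x) = PySem.List.min? ys (fun x => x) := by
  match hx : PySem.List.min? xs (fun x => x), hy : PySem.List.min? ys (fun x => x) with
  | none, none => rfl
  | none, some m => rw [PySem.List.min?_eq_none_iff] at hx; subst hx
                    have := PySem.List.min?_mem hy; simp [← h.mem_iff] at this
  | some m, none => rw [PySem.List.min?_eq_none_iff] at hy; subst hy
                    have := PySem.List.min?_mem hx; simp [h.mem_iff] at this
  | some m1, some m2 =>
    have h1 := PySem.List.min?_isMin hx (y := m2) (h.mem_iff.2 (PySem.List.min?_mem hy))
    have h2 := PySem.List.min?_isMin hy (y := m1) (h.mem_iff.1 (PySem.List.min?_mem hx))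
    simp at h1 h2 ⊢; omega

theorem foldl_add_ofList (ys : List (List Int)) (acc : PySem.Set (List Int)) :
    List.foldl PySem.Set.add acc (PySem.Set.ofList ys) = List.foldl PySem.Set.add acc ys := by
  induction ys using List.reverseRecOn generalizing acc with
  | nil => rfl
  | append_singleton ys y ih =>
    rw [List.foldl_append, ← ih acc]
    by_cases hy : y ∈ PySem.Set.ofList ys
    · have h1 : PySem.Set.ofList (ys ++ [y]) = PySem.Set.ofList ys := by
        rw [PySem.Set.ofList_eq_foldl, List.foldl_append, PySem.Set.ofList_eq_foldl]
        simp only [List.foldl_cons, List.foldl_nil, PySem.Set.add]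
        rw [if_pos ((PySem.Set.contains_iff _ y).2 (by simpa [PySem.Set.ofList_eq_foldl] using hy))]
      rw [h1]
      have hy2 : y ∈ List.foldl PySem.Set.add acc (PySem.Set.ofList ys) := by
        rw [ih]
        exact (PySem.Set.mem_update acc ys y).2 (Or.inr ((PySem.Set.mem_ofList ys y).1 hy))
      simp only [List.foldl_cons, List.foldl_nil, PySem.Set.add]
      rw [if_pos ((PySem.Set.contains_iff _ y).2 hy2)]
    · have h1 : PySem.Set.ofList (ys ++ [y]) = PySem.Set.ofList ys ++ [y] := by
        rw [PySem.Set.ofList_eq_foldl, List.foldl_append, PySem.Set.ofList_eq_foldl]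
        simp only [List.foldl_cons, List.foldl_nil, PySem.Set.add]
        rw [if_neg (fun hc => hy ((PySem.Set.contains_iff _ y).1 (by simpa [PySem.Set.ofList_eq_foldl] using hc)))]
      rw [h1, List.foldl_append, ih]

-- '<' on sets is a strict order: transitivity, used to collapse staged pruning.
theorem setLt_trans {s t u : PySem.Set Int} (h1 : setLt s t = true) (h2 : setLt t u = true) :
    setLt s u = true := by
  simp only [setLt, Bool.and_eq_true, Bool.not_eq_true', ← Bool.not_eq_true] at h1 h2 ⊢
  obtain ⟨hst, hne1⟩ := h1
  obtain ⟨htu, hne2⟩ := h2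
  rw [PySem.Set.issubset_iff] at hst htu
  constructor
  · rw [PySem.Set.issubset_iff]
    exact fun x hx => htu x (hst x hx)
  · intro heq
    rw [PySem.Set.equal_iff] at heq
    exact hne2 (by
      rw [PySem.Set.equal_iff]
      intro x
      exact ⟨fun hx => htu x hx, fun hx => hst x ((heq x).2 hx)⟩)

theorem survAcc_mono (orig : Int → List (PySem.Set Int)) (Ls : List Int)
    (s0 : List (PySem.Set Int)) {i j : Nat} (hij : i ≤ j) {t : PySem.Set Int}
    (ht : t ∈ survAcc orig Ls s0 i) : t ∈ survAcc orig Ls s0 j := by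
  induction j with
  | zero => have : i = 0 := by omega
            subst this; exact ht
  | succ j ih =>
    by_cases h : i = j + 1
    · subst h; exact ht
    · exact List.mem_append_left _ (ih (by omega))

theorem mem_survAcc (orig : Int → List (PySem.Set Int)) (Ls : List Int) (j : Nat)
    (t : PySem.Set Int) :
    t ∈ survAcc orig Ls [] j ↔ ∃ i, i < j ∧ t ∈ kept1 orig (survAcc orig Ls [] i) (Ls.getD i 0) := by
  induction j with
  | zero => simp [survAcc]
  | succ j ih =>
    constructor
    · intro ht
      rcases List.mem_append.1 ht with h | h
      · obtain ⟨i, hi, hm⟩ := ih.1 h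
        exact ⟨i, by omega, hm⟩
      · exact ⟨j, by omega, h⟩
    · rintro ⟨i, hi, hm⟩
      by_cases h : i = j
      · subst h; exact List.mem_append_right _ hm
      · exact List.mem_append_left _ (ih.2 ⟨i, by omega, hm⟩)

-- THE COLLAPSE: a set is a proper subset of some SURVIVING set from a longer bucket
-- iff it is a proper subset of ANY set from a longer bucket (a pruned pruner always
-- has a surviving superset).
theorem collapse (items : List (Int × PySem.Set Int)) (Ls : List Int)
    (orig : Int → List (PySem.Set Int))
    (horig : ∀ L, orig L = (items.filter (fun ms => ms.1 == L)).map Prod.snd)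
    (hpw : Ls.Pairwise (· > ·))
    (hmem : ∀ M, M ∈ Ls ↔ M ∈ items.map Prod.fst)
    (j : Nat) (hj : j < Ls.length) (s : PySem.Set Int) :
    (survAcc orig Ls [] j).any (fun t => setLt s t)
      = items.any (fun mt => decide (Ls.getD j 0 < mt.1) && setLt s mt.2) := by
  rw [Bool.eq_iff_iff]
  simp only [List.any_eq_true, Bool.and_eq_true, decide_eq_true_eq]
  have hpwget := List.pairwise_iff_getElem.1 hpw
  constructor
  · rintro ⟨t, ht, hlt⟩
    obtain ⟨i, hij, hkept⟩ := (mem_survAcc orig Ls j t).1 ht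
    have hi : i < Ls.length := by omega
    have htorig : t ∈ orig (Ls.getD i 0) := List.mem_of_mem_filter hkept
    rw [horig] at htorig
    obtain ⟨mt, hmt, rfl⟩ := List.mem_map.1 htorig
    have hmtmem := List.mem_of_mem_filter hmt
    have hmtkey : mt.1 = Ls.getD i 0 := by
      have := List.of_mem_filter hmt
      simpa using this
    refine ⟨mt, hmtmem, ?_, hlt⟩
    rw [hmtkey, List.getD_eq_getElem Ls 0 hi, List.getD_eq_getElem Ls 0 hj]
    exact hpwget i j hi hj hij
  · rintro ⟨mt, hmt, hgt, hlt⟩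
    have hMls : mt.1 ∈ Ls := (hmem mt.1).2 (List.mem_map.2 ⟨mt, hmt, rfl⟩)
    obtain ⟨i, hi, hIdx⟩ := List.getElem_of_mem hMls
    have hij : i < j := by
      by_contra hc
      rcases Nat.lt_or_ge j i with hji | hji
      · have := hpwget j i hj hi hji
        rw [List.getD_eq_getElem Ls 0 hj] at hgt
        rw [hIdx] at this
        omega
      · have : i = j := by omega
        subst this
        rw [List.getD_eq_getElem Ls 0 hj, hIdx] at hgt
        omega
    have hmtorig : mt.2 ∈ orig (Ls.getD i 0) := by
      rw [horig]
      refine List.mem_map.2 ⟨mt, List.mem_filter.2 ⟨hmt, ?_⟩, rfl⟩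
      rw [List.getD_eq_getElem Ls 0 hi, hIdx]
      simp
    by_cases hpruned : (survAcc orig Ls [] i).any (fun u => setLt mt.2 u) = true
    · simp only [List.any_eq_true] at hpruned
      obtain ⟨u, hu, hltu⟩ := hpruned
      exact ⟨u, survAcc_mono orig Ls [] (by omega : i ≤ j) hu, setLt_trans hlt hltu⟩
    · have hkept : mt.2 ∈ kept1 orig (survAcc orig Ls [] i) (Ls.getD i 0) := by
        refine List.mem_filter.2 ⟨hmtorig, ?_⟩
        simpa using hpruned
      exact ⟨mt.2, (mem_survAcc orig Ls j mt.2).2 ⟨i, hij, hkept⟩, hlt⟩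

-- ===== VERDICT (by name: the statement is the Claim_ definition above) =====
theorem prune_paths_spec : Claim_equal_prune_paths := by
  unfold Claim_equal_prune_paths
  intro paths _
  unfold Spec_prune_paths
  simp only [prune_paths, prune_paths_alt]
  set items : List (Int × PySem.Set Int) :=
    paths.map (fun p => ((p.length : Int), PySem.Set.ofList p)) with hitems
  set G := paths.foldl (fun d path => d.modify ((path.length : Int)) [] (fun l => l ++ [PySem.Set.ofList path])) PySem.Dict.empty with hGdef
  have hG2 : G = items.foldl (fun d p => d.modify p.1 [] (fun l => l ++ [p.2])) PySem.Dict.empty := by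
    rw [hGdef, hitems, List.foldl_map]
  have hnodK : G.keys.Nodup :=
    PySem.Dict.nodup_keys_foldl_modify_key paths (fun path => (path.length : Int)) []
      (fun d path => fun l => l ++ [PySem.Set.ofList path]) PySem.Dict.empty PySem.Dict.nodup_keys_empty
  have hbucketG : ∀ L, G.getD L [] = (items.filter (fun ms => ms.1 == L)).map Prod.snd := by
    intro L
    rw [hG2, PySem.Dict.getD_foldl_modify_append, PySem.Dict.getD_empty]
    simp
  have hkeysG : G.keys = PySem.Set.ofList (items.map Prod.fst) := by
    rw [hG2, PySem.Dict.keys_foldl_modify_key items (fun p => p.1) [] (fun d p => fun l => l ++ [p.2]) PySem.Dict.empty]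
    simp [PySem.Set.update_nil_left]
  have hlensB : PySem.List.dedup (items.map (fun ms => ms.1)) = G.keys := by
    rw [hkeysG]; simp
  rw [hlensB]
  set Ls : List Int := (PySem.List.sorted G.keys (fun x => x) false).reverse with hLsdef
  have hperm : Ls.Perm G.keys :=
    (List.reverse_perm _).trans (PySem.List.sorted_perm G.keys (fun x => x) false)
  have hnd : Ls.Nodup := hperm.nodup_iff.2 hnodK
  have hpw : Ls.Pairwise (· > ·) := by
    rw [hLsdef, List.pairwise_reverse]
    have hle := PySem.List.sorted_pairwise G.keys (fun x => x)
    have hne : (PySem.List.sorted G.keys (fun x => x) false).Nodup :=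
      (PySem.List.sorted_perm G.keys (fun x => x) false).nodup_iff.2 hnodK
    exact (hle.and hne).imp (fun h => lt_of_le_of_ne h.1 h.2)
  have hlen : Ls.length = G.keys.length := hperm.length_eq
  by_cases hc : Ls.length < 2
  · rw [if_pos hc, if_pos (by omega : G.keys.length < 2)]
  · rw [if_neg hc, if_neg (by omega : ¬ G.keys.length < 2)]
    rw [min?_id_perm Ls G.keys hperm]
    cases hmk : PySem.List.min? G.keys (fun x => x) with
    | none => rfl
    | some m =>
      dsimp only
      by_cases hm2 : m < 2
      · rw [if_pos hm2, if_pos hm2]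
      · rw [if_neg hm2, if_neg hm2]
        -- main branch
        have hcast : ((Ls.length : Int) - 1) = ((Ls.length - 1 : Nat) : Int) := by omega
        rw [hcast, PySem.List.pyRange_zero_natCast, List.foldl_map]
        obtain ⟨hK, hbuck⟩ := aLoop (fun L => G.getD L []) Ls hnd G
          (fun L hL => hperm.subset hL) (fun _ => rfl) (Ls.length - 1) le_rfl
        rw [hK]
        refine PySem.List.foldl_congr_mem _ _ _ _ ?_
        intro acc k hkmem
        obtain ⟨j, hj, hjk⟩ := List.getElem_of_mem (hperm.mem_iff.2 hkmem)
        have hgd : Ls.getD j 0 = k := by rw [List.getD_eq_getElem Ls 0 hj, hjk]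
        have hA := hbuck j hj
        rw [hgd] at hA
        have hmin : min j (Ls.length - 1) = j := by omega
        rw [hmin] at hA
        rw [hA]
        -- A side: union of the bucket's sorted tuples, as a fold of adds
        have hAside : ∀ (xs : List (PySem.Set Int)),
            PySem.Set.union acc (PySem.Set.ofList (xs.map (fun path => PySem.List.sorted path (fun x => x) false)))
              = xs.foldl (fun acc s => PySem.Set.add acc (PySem.List.sorted s (fun x => x) false)) acc := by
          intro xs
          simp only [PySem.Set.union, PySem.Set.update]
          rw [foldl_add_ofList, List.foldl_map]
        rw [hAside]
        -- B side: the guarded fold over items, via the collapse of staged pruning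
        have hcollapse := collapse items Ls (fun L => G.getD L []) hbucketG hpw
          (fun M => by rw [hperm.mem_iff, hkeysG]; exact PySem.Set.mem_ofList _ _) j hj
        rw [hgd] at hcollapse
        have hLHS : kept1 (fun L => G.getD L []) (survAcc (fun L => G.getD L []) Ls [] j) k
            = (items.filter (fun ms =>
                (!((survAcc (fun L => G.getD L []) Ls [] j).any (fun t => setLt ms.2 t))) && (ms.1 == k))).map Prod.snd := by
          show (G.getD k []).filter _ = _
          rw [hbucketG, List.filter_map, List.filter_filter]
          rfl
        have hfilteq : items.filter (fun ms =>
                (!((survAcc (fun L => G.getD L []) Ls [] j).any (fun t => setLt ms.2 t))) && (ms.1 == k))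
            = items.filter (fun ms => ms.1 == k && keepB items ms.1 ms.2) := by
          apply List.filter_congr
          intro ms _
          by_cases h1 : ms.1 = k
          · have hms1 : (ms.1 == k) = true := by simp [h1]
            rw [hms1, Bool.and_true, Bool.true_and]
            show _ = keepB items ms.1 ms.2
            rw [h1]
            show _ = !(items.any (fun mt => decide (k < mt.1) && setLt ms.2 mt.2))
            rw [hcollapse ms.2]
          · have hms1 : (ms.1 == k) = false := by simp [h1]
            rw [hms1, Bool.and_false, Bool.false_and]
        rw [hLHS, hfilteq, List.foldl_map, List.foldl_filter]
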